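-- pv_equiv track=rewrite | github.com/KisloTAooAnkit/Python-Programs | BinarySearch/KthSmallestNumberAgain.py | KthSmallestAgain
-- ===== SOURCE A (Python) =====
-- def KthSmallestAgain(intervals,target):
--     n = len(intervals)
--     for i in range(n):
--         pair = intervals[i]
--         noe = pair[1] - pair[0] + 1
--         if(target>noe):
--             target -=noe
--         else:
--             return pair[0] + target-1
--     return -1
-- ===== SOURCE B (Python) =====
-- def KthSmallestAgain(intervals, target):
--     # Pass 1: build the cumulative-count table of interval sizes.
--     cums = []
--     s = 0
--     for lo, hi in intervals:
--         s += hi - lo + 1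
--         cums.append(s)
--     # Pass 2: locate the first interval whose cumulative count reaches target.
--     prev = 0
--     for (lo, _), cum in zip(intervals, cums):
--         if target <= cum:
--             return lo + (target - prev) - 1
--         prev = cum
--     return -1
-- ===== Notes on version B (the rewrite author's own statement) =====
-- stated objective: alternative
-- what changed: B precomputes a cumulative-count table of interval sizes and then finds the first index whose cumulative count reaches the (unmodified) target, replacing A's in-place sequential subtraction from target; a plain scan is used for the lookup instead of bisect because the cumulative table need not be monotone for degenerate intervals, where bisect would change the result.
import Mathlib
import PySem

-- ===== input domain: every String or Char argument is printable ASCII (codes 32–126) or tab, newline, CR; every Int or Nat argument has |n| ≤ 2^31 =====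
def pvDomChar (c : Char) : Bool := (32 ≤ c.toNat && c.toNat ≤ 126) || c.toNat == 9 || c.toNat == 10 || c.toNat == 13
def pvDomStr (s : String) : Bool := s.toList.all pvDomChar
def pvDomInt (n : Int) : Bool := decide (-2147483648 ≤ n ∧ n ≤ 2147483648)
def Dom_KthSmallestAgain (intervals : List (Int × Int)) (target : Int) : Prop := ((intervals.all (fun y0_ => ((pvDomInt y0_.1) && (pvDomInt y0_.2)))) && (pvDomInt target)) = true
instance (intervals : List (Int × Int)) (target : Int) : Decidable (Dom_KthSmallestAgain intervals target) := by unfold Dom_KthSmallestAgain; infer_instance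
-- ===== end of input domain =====

-- B replaces A's in-place sequential subtraction with a precomputed cumulative-count table
-- plus a first-index lookup on it (alternative decomposition; same O(n) cost).


-- ===== PORT A =====
-- A's indexed for-loop over intervals, mutating target, as structural recursion on the list.
def KthSmallestAgainGo : List (Int × Int) → Int → Int
  | [], _ => -1
  | pair :: rest, target =>
    let noe := pair.2 - pair.1 + 1
    if target > noe then KthSmallestAgainGo rest (target - noe)
    else pair.1 + target - 1

def KthSmallestAgain (intervals : List (Int × Int)) (target : Int) : Int :=
  KthSmallestAgainGo intervals target

-- ===== PORT B =====
-- Pass 1 of B: the cumulative-count table (running sum s).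
def altCums : List (Int × Int) → Int → List Int
  | [], _ => []
  | (lo, hi) :: rest, s => (s + (hi - lo + 1)) :: altCums rest (s + (hi - lo + 1))

-- Pass 2 of B: scan the zipped (interval, cumulative) table, carrying prev.
def altFind : List ((Int × Int) × Int) → Int → Int → Int
  | [], _, _ => -1
  | ((lo, _), cum) :: rest, target, prev =>
    if target ≤ cum then lo + (target - prev) - 1
    else altFind rest target cum

def KthSmallestAgain_alt (intervals : List (Int × Int)) (target : Int) : Int :=
  altFind (intervals.zip (altCums intervals 0)) target 0

-- ===== PRECONDITION & SPEC =====
def Spec_KthSmallestAgain (intervals : List (Int × Int)) (target : Int) (out : Int) : Prop := out = KthSmallestAgain_alt intervals target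
instance (intervals : List (Int × Int)) (target : Int) (out : Int) : Decidable (Spec_KthSmallestAgain intervals target out) := by unfold Spec_KthSmallestAgain; infer_instance

-- ===== CLAIM (what is proved, stated in full; the proofs are below) =====
def Claim_equal_KthSmallestAgain : Prop := ∀ (intervals : List (Int × Int)) (target : Int), Dom_KthSmallestAgain intervals target → Spec_KthSmallestAgain intervals target (KthSmallestAgain intervals target)

-- ===== LEMMAS AND PROOFS =====
-- Invariant: B's scan at offset s with the table built from s computes A's loop on target - s.
theorem go_eq_altFind (l : List (Int × Int)) : ∀ t s : Int,
    KthSmallestAgainGo l t = altFind (l.zip (altCums l s)) (t + s) s := by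
  induction l with
  | nil => intro t s; simp [KthSmallestAgainGo, altCums, altFind]
  | cons p rest ih =>
    intro t s
    obtain ⟨lo, hi⟩ := p
    simp only [KthSmallestAgainGo, altCums, List.zip_cons_cons, altFind]
    by_cases h : t > hi - lo + 1
    · rw [if_pos h, if_neg (by omega)]
      have := ih (t - (hi - lo + 1)) (s + (hi - lo + 1))
      rw [show t - (hi - lo + 1) + (s + (hi - lo + 1)) = t + s by ring] at this
      exact this
    · rw [if_neg h, if_pos (by omega)]
      ring

-- ===== VERDICT (by name: the statement is the Claim_ definition above) =====
theorem KthSmallestAgain_spec : Claim_equal_KthSmallestAgain := by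
  intro intervals target _
  unfold Spec_KthSmallestAgain KthSmallestAgain KthSmallestAgain_alt
  simpa using go_eq_altFind intervals target 0
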